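-- pv_equiv track=rewrite | github.com/mindhiveoy/pyopenapi_gen | src/pyopenapi_gen/helpers/endpoint_utils.py | format_method_args
-- ===== SOURCE A (Python) =====
-- from typing import Any, Dict, List, Optional
--
-- def format_method_args(params: list[dict[str, Any]]) -> str:
--     """
--     Format a list of parameter dicts into a Python function argument string (excluding
--     'self'). Each dict must have: name, type, default (None or string), required (bool).
--     Required params come first, then optional params with defaults.
--     """
--     required = [p for p in params if p.get("required", True)]
--     optional = [p for p in params if not p.get("required", True)]
--     arg_strs = []
--     for p in required:
--         arg_strs.append(f"{p['name']}: {p['type']}")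
--     for p in optional:
--         default = p["default"]
--         arg_strs.append(f"{p['name']}: {p['type']} = {default}")
--     return ", ".join(arg_strs)
-- ===== SOURCE B (Python) =====
-- def format_method_args(params: list) -> str:
--     """Stable-sort params so required precede optional, then format in one pass."""
--     ordered = sorted(params, key=lambda p: not p.get("required", True))
--     def fmt(p):
--         s = f"{p['name']}: {p['type']}"
--         return s if p.get("required", True) else s + f" = {p['default']}"
--     return ", ".join(fmt(p) for p in ordered)
-- ===== Notes on version B (the rewrite author's own statement) =====
-- stated objective: simpler
-- what changed: Replaces A's two filter passes plus two separate formatting loops with a single stable sort on the boolean required-flag key followed by one formatting pass; stability of Python's sort preserves each group's original order, so the result is identical.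
import Mathlib
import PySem

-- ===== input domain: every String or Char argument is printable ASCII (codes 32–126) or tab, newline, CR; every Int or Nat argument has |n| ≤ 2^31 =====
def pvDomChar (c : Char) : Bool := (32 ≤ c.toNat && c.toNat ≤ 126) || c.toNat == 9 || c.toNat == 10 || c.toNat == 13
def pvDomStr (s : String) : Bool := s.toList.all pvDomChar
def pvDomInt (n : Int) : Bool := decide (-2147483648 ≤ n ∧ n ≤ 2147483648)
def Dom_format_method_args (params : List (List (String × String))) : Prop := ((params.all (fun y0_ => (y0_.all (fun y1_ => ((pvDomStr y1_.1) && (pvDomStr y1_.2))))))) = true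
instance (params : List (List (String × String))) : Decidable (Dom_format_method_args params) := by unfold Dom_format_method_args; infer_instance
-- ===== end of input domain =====

-- B replaces A's two filter passes plus two formatting loops with one stable sort on the required-flag key followed by a single formatting pass (objective: simpler).


-- ===== PORT A =====
-- p.get("required", True) is truthy: missing key defaults to True; a present string is truthy iff nonempty
def pvAReq (p : List (String × String)) : Bool :=
  match PySem.Dict.get? (PySem.Dict.ofList p) "required" with
  | none => true
  | some s => !(s = "")

-- f"{p['name']}: {p['type']}" ; getD "" is exact under Pre_ (the key is present there)
def pvAFmtReq (p : List (String × String)) : String :=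
  PySem.Dict.getD (PySem.Dict.ofList p) "name" "" ++ ": " ++ PySem.Dict.getD (PySem.Dict.ofList p) "type" ""

def pvAFmtOpt (p : List (String × String)) : String :=
  PySem.Dict.getD (PySem.Dict.ofList p) "name" "" ++ ": " ++ PySem.Dict.getD (PySem.Dict.ofList p) "type" "" ++ " = " ++ PySem.Dict.getD (PySem.Dict.ofList p) "default" ""

def format_method_args (params : List (List (String × String))) : String :=
  let required := params.filter pvAReq
  let optional := params.filter (fun p => !pvAReq p)
  let arg_strs : List String := required.foldl (fun acc p => acc ++ [pvAFmtReq p]) []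
  let arg_strs := optional.foldl (fun acc p => acc ++ [pvAFmtOpt p]) arg_strs
  PySem.Str.join ", " arg_strs

-- ===== PORT B =====
def pvBReq (p : List (String × String)) : Bool :=
  match PySem.Dict.get? (PySem.Dict.ofList p) "required" with
  | none => true
  | some s => !(s = "")

-- the sort key: not p.get("required", True), a Python bool, i.e. 0 for required, 1 for optional
def pvBKey (p : List (String × String)) : Nat := if pvBReq p then 0 else 1

-- fmt(p): the base string, extended with the default exactly when the param is optional
def pvBFmt (p : List (String × String)) : String :=
  let s := PySem.Dict.getD (PySem.Dict.ofList p) "name" "" ++ ": " ++ PySem.Dict.getD (PySem.Dict.ofList p) "type" ""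
  if pvBReq p then s else s ++ " = " ++ PySem.Dict.getD (PySem.Dict.ofList p) "default" ""

def format_method_args_alt (params : List (List (String × String))) : String :=
  let ordered := PySem.List.sorted params pvBKey
  PySem.Str.join ", " (ordered.map pvBFmt)

-- ===== PRECONDITION & SPEC =====
-- Pre_ excludes exactly the inputs where the Python A raises KeyError: a param without "name" or
-- "type", or an optional param (falsy "required" entry) without "default".
-- Python evaluates p.get("required", True); the dict values here are strings, a string is truthy iff
-- nonempty, and a missing key is Python's True — recorded as the flag strings "True"/"False".
def pvRequiredFlag (p : List (String × String)) : String :=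
  if PySem.Dict.getD (PySem.Dict.ofList p) "required" "True" = "" then "False" else "True"

def Pre_format_method_args (params : List (List (String × String))) : Prop :=
  ∀ p ∈ params, (PySem.Dict.get? (PySem.Dict.ofList p) "name").isSome ∧
    (PySem.Dict.get? (PySem.Dict.ofList p) "type").isSome ∧
    (pvRequiredFlag p = "False" → (PySem.Dict.get? (PySem.Dict.ofList p) "default").isSome)
instance (params : List (List (String × String))) : Decidable (Pre_format_method_args params) := by unfold Pre_format_method_args; infer_instance

def pvWitness_format_method_args : (List (List (String × String))) :=
  [[("name", "a"), ("type", "int"), ("default", "None"), ("required", "True")], [("name", "b"), ("type", "str"), ("required", ""), ("default", "None")]]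

def Spec_format_method_args (params : List (List (String × String))) (out : String) : Prop := out = format_method_args_alt params
instance (params : List (List (String × String))) (out : String) : Decidable (Spec_format_method_args params out) := by unfold Spec_format_method_args; infer_instance

-- ===== CLAIM (what is proved, stated in full; the proofs are below) =====
def Claim_equal_format_method_args : Prop := ∀ (params : List (List (String × String))), Dom_format_method_args params → Pre_format_method_args params → Spec_format_method_args params (format_method_args params)

-- ===== LEMMAS AND PROOFS =====

lemma foldl_append_singleton {α : Type} (f : α → String) :
    ∀ (l : List α) (init : List String),
      l.foldl (fun acc p => acc ++ [f p]) init = init ++ l.map f := by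
  intro l
  induction l with
  | nil => simp
  | cons x xs ih => intro init; simp [List.foldl, ih]

-- inserting into a 0-block followed by a 1-block (two-valued key): stable placement
lemma insertBy_two (x : List (String × String)) :
    ∀ (r o : List (List (String × String))),
      (∀ a ∈ r, pvBKey a = 0) → (∀ a ∈ o, pvBKey a = 1) →
      PySem.List.insertBy (fun a b => decide (pvBKey a < pvBKey b)) x (r ++ o) =
        if pvBKey x = 0 then r ++ x :: o else (r ++ o) ++ [x] := by
  intro r
  induction r with
  | nil =>
    intro o _ ho
    induction o with
    | nil => simp [PySem.List.insertBy]
    | cons y ys iho =>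
      have hy : pvBKey y = 1 := ho y (by simp)
      by_cases hx : pvBKey x = 0
      · simp [PySem.List.insertBy, hx, hy]
      · have hx1 : pvBKey x = 1 := by unfold pvBKey at hx ⊢; split at hx <;> simp_all
        have := iho (fun a ha => ho a (by simp [ha]))
        simp [PySem.List.insertBy, hx1, hy] at this ⊢
        simpa [hx] using this
  | cons y ys ih =>
    intro o hr ho
    have hy : pvBKey y = 0 := hr y (by simp)
    have := ih o (fun a ha => hr a (by simp [ha])) ho
    by_cases hx : pvBKey x = 0 <;>
      simp [PySem.List.insertBy, hy, hx, this]

-- the stable insertion sort on a two-valued key is: key-0 elements in order, then key-1 elements in order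
lemma foldl_insertBy_two :
    ∀ (l r o : List (List (String × String))),
      (∀ a ∈ r, pvBKey a = 0) → (∀ a ∈ o, pvBKey a = 1) →
      l.foldl (fun acc x => PySem.List.insertBy (fun a b => decide (pvBKey a < pvBKey b)) x acc) (r ++ o) =
        (r ++ l.filter (fun p => pvBKey p == 0)) ++ (o ++ l.filter (fun p => pvBKey p == 1)) := by
  intro l
  induction l with
  | nil => intro r o _ _; simp
  | cons x xs ih =>
    intro r o hr ho
    rw [List.foldl_cons, insertBy_two x r o hr ho]
    by_cases hx : pvBKey x = 0
    · have : r ++ x :: o = (r ++ [x]) ++ o := by simp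
      rw [if_pos hx, this, ih (r ++ [x]) o
        (by intro a ha; rcases List.mem_append.1 ha with h | h
            · exact hr a h
            · simp at h; simpa [h] using hx) ho]
      simp [List.filter, hx]
    · have hx1 : pvBKey x = 1 := by unfold pvBKey at hx ⊢; split at hx <;> simp_all
      rw [if_neg hx, List.append_assoc, ih r (o ++ [x]) hr
        (by intro a ha; rcases List.mem_append.1 ha with h | h
            · exact ho a h
            · simp at h; simpa [h] using hx1)]
      simp [List.filter, hx1]

lemma sorted_two (params : List (List (String × String))) :
    PySem.List.sorted params pvBKey =
      params.filter pvBReq ++ params.filter (fun p => !pvBReq p) := by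
  rw [PySem.List.sorted_eq_foldl_insertBy]
  have h := foldl_insertBy_two params [] [] (by simp) (by simp)
  simp only [List.nil_append] at h
  rw [h]
  congr 1 <;> apply List.filter_congr <;> intro p _ <;>
    unfold pvBKey <;> cases hb : pvBReq p <;> simp_all

theorem format_method_args_spec : Claim_equal_format_method_args := by
  intro params _ _
  unfold Spec_format_method_args format_method_args format_method_args_alt
  rw [sorted_two]
  simp only [foldl_append_singleton, List.nil_append, List.map_append]
  congr 2
  · apply List.map_congr_left
    intro p hp
    have : pvBReq p = true := (List.mem_filter.1 hp).2
    simp [pvBFmt, pvAFmtReq, this]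
  · apply List.map_congr_left
    intro p hp
    have : pvBReq p = false := by
      have := (List.mem_filter.1 hp).2; simpa using this
    simp [pvBFmt, pvAFmtOpt, this]
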